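-- pv_equiv track=rewrite | github.com/Qazalbash/GeneTime | structured/table.py | faculty_clashes
-- ===== SOURCE A (Python) =====
-- def faculty_clashes(instructors_schedule: dict) -> int:
--     clashes = 0
--     for instructor_id in instructors_schedule.keys():
--         classes = instructors_schedule[instructor_id]
--         N = len(classes)
--         for i in range(N):
--             id_i, day_i, start_i, duration_i = classes[i]
--             for j in range(i + 1, N):
--                 id_j, day_j, start_j, duration_j = classes[j]
--                 if day_i == day_j and not (start_i + duration_i < start_j or start_j + duration_j < start_i):
--                     clashes += 1
--     return clashes
-- ===== SOURCE B (Python) =====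
-- def faculty_clashes(instructors_schedule: dict) -> int:
--     clashes = 0
--     for classes in instructors_schedule.values():
--         by_day = {}
--         for _cid, day, start, duration in classes:
--             by_day.setdefault(day, []).append((start, start + duration))
--         for group in by_day.values():
--             for k in range(len(group)):
--                 s, e = group[k]
--                 for s2, e2 in group[k + 1:]:
--                     if s2 <= e and s <= e2:
--                         clashes += 1
--     return clashes
-- ===== Notes on version B (the rewrite author's own statement) =====
-- stated objective: alternative
-- what changed: B buckets each instructor's classes into a dict keyed by day and counts overlapping interval pairs only within a day's bucket, so the pair test runs on O(sum_d N_d^2) same-day pairs instead of A's O(N^2) index-pair scan with a day-equality test on every pair.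
import Mathlib
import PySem

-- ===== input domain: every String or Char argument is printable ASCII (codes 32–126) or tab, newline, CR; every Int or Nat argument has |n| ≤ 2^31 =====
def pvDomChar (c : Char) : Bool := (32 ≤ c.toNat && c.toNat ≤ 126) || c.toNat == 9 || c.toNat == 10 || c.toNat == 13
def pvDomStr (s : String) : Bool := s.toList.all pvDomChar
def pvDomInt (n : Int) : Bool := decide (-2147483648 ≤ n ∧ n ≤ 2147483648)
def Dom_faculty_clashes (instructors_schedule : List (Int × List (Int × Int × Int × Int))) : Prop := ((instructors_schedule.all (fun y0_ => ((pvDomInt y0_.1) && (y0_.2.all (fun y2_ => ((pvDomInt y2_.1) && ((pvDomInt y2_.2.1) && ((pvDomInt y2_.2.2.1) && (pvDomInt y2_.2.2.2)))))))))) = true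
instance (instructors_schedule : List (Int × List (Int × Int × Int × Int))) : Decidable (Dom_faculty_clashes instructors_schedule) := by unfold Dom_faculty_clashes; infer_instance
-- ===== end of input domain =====

-- B buckets each instructor's classes into a dict keyed by day and counts overlapping pairs
-- only inside a day's bucket, instead of A's all-pairs index scan with a per-pair day test.


-- ===== PORT A =====
def faculty_clashes (instructors_schedule : List (Int × List (Int × Int × Int × Int))) : Int :=
  let d := PySem.Dict.ofList instructors_schedule
  (PySem.Dict.keys d).foldl (fun clashes instructor_id =>
    let classes := PySem.Dict.getD d instructor_id []
    let N : Int := PySem.List.len classes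
    (PySem.List.pyRange 0 N 1).foldl (fun clashes i =>
      let ci := PySem.List.pyGetD classes i (0, 0, 0, 0)
      (PySem.List.pyRange (i + 1) N 1).foldl (fun clashes j =>
        let cj := PySem.List.pyGetD classes j (0, 0, 0, 0)
        if ci.2.1 = cj.2.1 ∧ ¬ (ci.2.2.1 + ci.2.2.2 < cj.2.2.1 ∨ cj.2.2.1 + cj.2.2.2 < ci.2.2.1)
        then clashes + 1 else clashes) clashes) clashes) 0

-- ===== PORT B =====
-- B helper: overlapping pairs inside one same-day bucket (each element against the rest)
def sameDayClashes : List (Int × Int) → Int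
  | [] => 0
  | (s, e) :: rest =>
      ((rest.countP (fun q => decide (q.1 ≤ e ∧ s ≤ q.2)) : Nat) : Int) + sameDayClashes rest

def faculty_clashes_alt (instructors_schedule : List (Int × List (Int × Int × Int × Int))) : Int :=
  let d := PySem.Dict.ofList instructors_schedule
  (PySem.Dict.values d).foldl (fun clashes classes =>
    let byDay := classes.foldl
      (fun bd c => PySem.Dict.modify bd c.2.1 [] (fun g => g ++ [(c.2.2.1, c.2.2.1 + c.2.2.2)]))
      PySem.Dict.empty
    (PySem.Dict.values byDay).foldl (fun cl group => cl + sameDayClashes group) clashes) 0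

-- ===== PRECONDITION & SPEC =====
def Spec_faculty_clashes (instructors_schedule : List (Int × List (Int × Int × Int × Int))) (out : Int) : Prop := out = faculty_clashes_alt instructors_schedule
instance (instructors_schedule : List (Int × List (Int × Int × Int × Int))) (out : Int) : Decidable (Spec_faculty_clashes instructors_schedule out) := by unfold Spec_faculty_clashes; infer_instance

-- ===== CLAIM (what is proved, stated in full; the proofs are below) =====
def Claim_equal_faculty_clashes : Prop := ∀ (instructors_schedule : List (Int × List (Int × Int × Int × Int))), Dom_faculty_clashes instructors_schedule → Spec_faculty_clashes instructors_schedule (faculty_clashes instructors_schedule)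

-- ===== LEMMAS AND PROOFS =====

-- A's pair test, as a Prop on two class records (abbrev: decidability is inferred through it)
abbrev clashTest (c c' : Int × Int × Int × Int) : Prop :=
  c.2.1 = c'.2.1 ∧ ¬ (c.2.2.1 + c.2.2.2 < c'.2.2.1 ∨ c'.2.2.1 + c'.2.2.2 < c.2.2.1)

-- head-against-rest characterisation of A's triangular index loop
def pairClash : List (Int × Int × Int × Int) → Int
  | [] => 0
  | c :: rest => ((rest.countP (fun c' => decide (clashTest c c')) : Nat) : Int) + pairClash rest

-- the (start, end) interval B stores for a class record
def ivOf (c : Int × Int × Int × Int) : Int × Int := (c.2.2.1, c.2.2.1 + c.2.2.2)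

theorem triangle_sum (xs : List (Int × Int × Int × Int)) :
    ((List.range xs.length).map
        (fun k => ((((xs.drop (k + 1)).countP
            (fun c' => decide (clashTest (xs.getD k (0,0,0,0)) c'))) : Nat) : Int))).sum
      = pairClash xs := by
  induction xs with
  | nil => simp [pairClash]
  | cons c cs ih =>
      rw [List.length_cons, List.range_succ_eq_map]
      simp only [List.map_cons, List.map_map, List.sum_cons, pairClash]
      rw [← ih]
      congr 1

theorem innerA_eq (classes : List (Int × Int × Int × Int)) (acc : Int) :
    (PySem.List.pyRange 0 (PySem.List.len classes) 1).foldl (fun clashes i =>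
      let ci := PySem.List.pyGetD classes i (0, 0, 0, 0)
      (PySem.List.pyRange (i + 1) (PySem.List.len classes) 1).foldl (fun clashes j =>
        let cj := PySem.List.pyGetD classes j (0, 0, 0, 0)
        if ci.2.1 = cj.2.1 ∧ ¬ (ci.2.2.1 + ci.2.2.2 < cj.2.2.1 ∨ cj.2.2.1 + cj.2.2.2 < ci.2.2.1)
        then clashes + 1 else clashes) clashes) acc
    = acc + pairClash classes := by
  rw [PySem.List.foldl_congr_mem _ _
    (fun (a : Int) (i : Int) =>
      a + (((classes.drop (i + 1).toNat).countP
        (fun cj => decide (clashTest (PySem.List.pyGetD classes i (0,0,0,0)) cj)) : Nat) : Int)) _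
    ?_]
  · rw [PySem.List.foldl_add]
    congr 1
    rw [← triangle_sum classes, PySem.List.pyRange_one]
    simp only [List.map_map]
    refine congrArg List.sum (List.map_congr_left ?_)
    intro k hk
    simp only [Function.comp_apply, zero_add, PySem.List.pyGetD_natCast]
    have h1 : ((k : Int) + 1).toNat = k + 1 := by omega
    rw [h1]
  · intro a i hi
    have h0 : (0:Int) ≤ i + 1 := by
      have := (PySem.List.mem_pyRange_one.mp hi).1; omega
    show (PySem.List.pyRange (i + 1) (PySem.List.len classes) 1).foldl (fun cl j =>
        if clashTest (PySem.List.pyGetD classes i (0,0,0,0)) (PySem.List.pyGetD classes j (0,0,0,0))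
        then cl + 1 else cl) a = _
    rw [PySem.List.foldl_pyRange_pyGetD classes (0,0,0,0)
      (fun cl cj => if clashTest (PySem.List.pyGetD classes i (0,0,0,0)) cj then cl + 1 else cl) a h0,
      PySem.List.foldl_ite_add_one]

-- sum over a Nodup key list of a function bumped at one key
theorem sum_map_add_single (K : List Int) (hnd : K.Nodup) (d0 : Int) (hd0 : d0 ∈ K)
    (F : Int → Int) (E : Int) :
    (K.map (fun d => F d + if d = d0 then E else 0)).sum = (K.map F).sum + E := by
  induction K with
  | nil => cases hd0
  | cons a K ih =>
      rcases List.mem_cons.mp hd0 with h | h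
      · subst h
        have hmap : ∀ d ∈ K, (F d + if d = d0 then E else 0) = F d := by
          intro d hd
          have : d ≠ d0 := by rintro rfl; exact (List.nodup_cons.mp hnd).1 hd
          simp [this]
        simp only [List.map_cons, List.sum_cons, List.map_congr_left hmap, if_pos]
        ring
      · have ha : a ≠ d0 := by rintro rfl; exact (List.nodup_cons.mp hnd).1 h
        simp only [List.map_cons, List.sum_cons, if_neg ha, add_zero,
          ih (List.nodup_cons.mp hnd).2 h]
        ring

-- central identity: triangular same-day pair count = sum of pair counts over day buckets
theorem pairClash_eq_buckets (cs : List (Int × Int × Int × Int)) (K : List Int)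
    (hnd : K.Nodup) (hK : ∀ c ∈ cs, c.2.1 ∈ K) :
    pairClash cs
      = (K.map (fun d => sameDayClashes ((cs.filter (fun c => c.2.1 == d)).map ivOf))).sum := by
  induction cs with
  | nil => simp [pairClash, sameDayClashes]
  | cons c cs ih =>
      have hc : c.2.1 ∈ K := hK c List.mem_cons_self
      have hrest : ∀ x ∈ cs, x.2.1 ∈ K := fun x hx => hK x (List.mem_cons_of_mem _ hx)
      have hpt : ∀ d ∈ K,
          sameDayClashes (((c :: cs).filter (fun x => x.2.1 == d)).map ivOf)
            = sameDayClashes ((cs.filter (fun x => x.2.1 == d)).map ivOf)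
              + if d = c.2.1
                then ((((cs.filter (fun x => x.2.1 == c.2.1)).map ivOf).countP
                    (fun q => decide (q.1 ≤ c.2.2.1 + c.2.2.2 ∧ c.2.2.1 ≤ q.2)) : Nat) : Int)
                else 0 := by
        intro d _
        by_cases hd : d = c.2.1
        · subst hd
          rw [List.filter_cons_of_pos (by simp)]
          simp only [List.map_cons, ivOf, sameDayClashes]
          rw [if_pos trivial]
          exact add_comm _ _
        · rw [List.filter_cons_of_neg (by simpa using fun h => hd h.symm)]
          simp [hd]
      rw [List.map_congr_left (fun d hd => hpt d hd),
        sum_map_add_single K hnd c.2.1 hc _ _]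
      rw [show pairClash (c :: cs)
          = ((cs.countP (fun c' => decide (clashTest c c')) : Nat) : Int) + pairClash cs from rfl]
      rw [ih hrest]
      rw [add_comm ((cs.countP (fun c' => decide (clashTest c c')) : Nat) : Int)]
      congr 1
      rw [List.countP_map, List.countP_filter]
      refine congrArg _ (List.countP_congr ?_)
      intro x _
      simp only [clashTest, ivOf, Function.comp_apply, decide_eq_true_eq, Bool.and_eq_true,
        beq_iff_eq]
      constructor
      · rintro ⟨hday, hov⟩; exact ⟨⟨by omega, by omega⟩, hday.symm⟩
      · rintro ⟨⟨h1, h2⟩, hday⟩; exact ⟨hday.symm, by omega⟩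

-- B's per-instructor bucketed count equals the triangular count
theorem perInstr_eq (classes : List (Int × Int × Int × Int)) (acc : Int) :
    (PySem.Dict.values (classes.foldl
        (fun bd c => PySem.Dict.modify bd c.2.1 [] (fun g => g ++ [(c.2.2.1, c.2.2.1 + c.2.2.2)]))
        PySem.Dict.empty)).foldl (fun cl group => cl + sameDayClashes group) acc
    = acc + pairClash classes := by
  have hfold : classes.foldl
      (fun bd c => PySem.Dict.modify bd c.2.1 [] (fun g => g ++ [(c.2.2.1, c.2.2.1 + c.2.2.2)]))
      PySem.Dict.empty
      = (classes.map (fun c => (c.2.1, ivOf c))).foldl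
        (fun bd p => PySem.Dict.modify bd p.1 [] (fun g => g ++ [p.2])) PySem.Dict.empty := by
    rw [List.foldl_map]
    rfl
  have hkeys : (classes.foldl
      (fun bd c => PySem.Dict.modify bd c.2.1 [] (fun g => g ++ [(c.2.2.1, c.2.2.1 + c.2.2.2)]))
      PySem.Dict.empty).keys = PySem.Set.ofList (classes.map (fun c => c.2.1)) := by
    rw [PySem.Dict.keys_foldl_modify_key classes (fun c => c.2.1) []
      (fun _ c g => g ++ [(c.2.2.1, c.2.2.1 + c.2.2.2)]) PySem.Dict.empty,
      PySem.Dict.keys_empty, PySem.Set.update_nil_left]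
  have hnd : (classes.foldl
      (fun bd c => PySem.Dict.modify bd c.2.1 [] (fun g => g ++ [(c.2.2.1, c.2.2.1 + c.2.2.2)]))
      PySem.Dict.empty).keys.Nodup := by
    rw [hkeys]; exact PySem.Set.nodup_ofList _
  have hgetD : ∀ d, (classes.foldl
      (fun bd c => PySem.Dict.modify bd c.2.1 [] (fun g => g ++ [(c.2.2.1, c.2.2.1 + c.2.2.2)]))
      PySem.Dict.empty).getD d [] = (classes.filter (fun c => c.2.1 == d)).map ivOf := by
    intro d
    rw [hfold, PySem.Dict.getD_foldl_modify_append]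
    rw [List.filter_map, List.map_map]
    simp [Function.comp_def]
  rw [PySem.Dict.values_eq_map_keys _ hnd []]
  rw [PySem.List.foldl_add, List.map_map]
  congr 1
  rw [pairClash_eq_buckets classes _ hnd
    (by intro c hc; rw [hkeys]; exact (PySem.Set.mem_ofList _ _).mpr (List.mem_map_of_mem hc))]
  refine congrArg List.sum (List.map_congr_left ?_)
  intro k hk
  simp only [Function.comp_apply, hgetD]

theorem both_eq (xs : List (Int × List (Int × Int × Int × Int))) :
    faculty_clashes xs = faculty_clashes_alt xs := by
  have hA : faculty_clashes xs
      = 0 + ((PySem.Dict.ofList xs).keys.map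
          (fun k => pairClash ((PySem.Dict.ofList xs).getD k []))).sum := by
    refine Eq.trans (PySem.List.foldl_congr_mem _ _
      (fun (a : Int) k => a + pairClash ((PySem.Dict.ofList xs).getD k [])) 0
      (fun a k _ => innerA_eq _ a)) ?_
    exact PySem.List.foldl_add _ _ 0
  have hB : faculty_clashes_alt xs
      = 0 + ((PySem.Dict.ofList xs).values.map pairClash).sum := by
    refine Eq.trans (PySem.List.foldl_congr_mem _ _
      (fun (a : Int) cl => a + pairClash cl) 0
      (fun a cl _ => perInstr_eq cl a)) ?_
    exact PySem.List.foldl_add _ _ 0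
  rw [hA, hB, PySem.Dict.values_eq_map_keys _ (PySem.Dict.nodup_keys_ofList xs) [],
    List.map_map]
  rfl

-- ===== VERDICT (by name: the statement is the Claim_ definition above) =====
theorem faculty_clashes_spec : Claim_equal_faculty_clashes := by
  intro xs _
  exact both_eq xs
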